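-- pv_equiv track=rewrite | github.com/pengjichengbest/Algorithm | new_problem.py | minDeletion
-- ===== SOURCE A (Python) =====
-- def minDeletion(nums):
--     cnt = 0
--     i, j = 0, 1
--     while i < len(nums):
--         while j < len(nums) and nums[i] == nums[j]:
--             cnt += 1
--             j += 1
--         if j == len(nums):
--             break
--         i, j = j + 1, j + 2
--     if (len(nums) - cnt) % 2 == 1:
--         return cnt + 1
--     return cnt
-- ===== SOURCE B (Python) =====
-- def minDeletion(nums):
--     res = 0
--     n = len(nums)
--     for i in range(n):
--         if (i - res) % 2 == 0 and i + 1 < n and nums[i] == nums[i + 1]: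
--             res += 1
--     if (n - res) % 2 == 1:
--         res += 1
--     return res
-- ===== Notes on version B (the rewrite author's own statement) =====
-- stated objective: idiomatic
-- what changed: Replaced A's two-pointer jump-over-duplicates nested while loops with the canonical single for-loop that tracks the parity of the kept prefix via (i - res) % 2.
import Mathlib
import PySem

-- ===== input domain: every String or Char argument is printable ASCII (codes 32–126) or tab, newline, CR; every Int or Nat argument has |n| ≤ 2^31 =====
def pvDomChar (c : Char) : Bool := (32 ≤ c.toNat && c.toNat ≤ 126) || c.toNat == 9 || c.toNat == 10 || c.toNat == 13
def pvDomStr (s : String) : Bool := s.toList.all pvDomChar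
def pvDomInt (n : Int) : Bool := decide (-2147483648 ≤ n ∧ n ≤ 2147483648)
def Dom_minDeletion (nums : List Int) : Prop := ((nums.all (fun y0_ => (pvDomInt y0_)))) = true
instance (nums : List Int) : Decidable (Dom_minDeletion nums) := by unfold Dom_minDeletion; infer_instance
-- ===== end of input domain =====

-- B replaces A's two-pointer nested while loops by the canonical single pass that
-- tracks the parity of the kept prefix (idiomatic; same O(n) cost).

-- ===== PORT A =====
-- A's nested while loops, flattened into one recursion over the state (cnt, i, j):
-- the first branch is the inner `while` step, the second the `break`, the third the
-- outer-loop update `i, j = j + 1, j + 2`.  The hypothesis `h : i < j` only carries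
-- the loop invariant needed for termination; it changes no computation.
def loopA (nums : List Int) (cnt i j : Int) (h : i < j) : Int :=
  if hi : i < (nums.length : Int) then
    if hj : j < (nums.length : Int) ∧ PySem.List.pyGet? nums i = PySem.List.pyGet? nums j then
      loopA nums (cnt + 1) i (j + 1) (by omega)
    else if j = (nums.length : Int) then cnt
    else loopA nums cnt (j + 1) (j + 2) (by omega)
  else cnt
termination_by ((nums.length - i).toNat, (nums.length - j).toNat)
decreasing_by
  · right; omega
  · left; omega

def minDeletion (nums : List Int) : Int :=
  let cnt := loopA nums 0 0 1 (by omega)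
  if PySem.Int.mod ((nums.length : Int) - cnt) 2 = 1 then cnt + 1 else cnt

-- ===== PORT B =====
-- B's `for i in range(n)` as a recursion over the index i.
def loopB (nums : List Int) (res : Int) (i : Nat) : Int :=
  if i < nums.length then
    loopB nums
      (if PySem.Int.mod ((i : Int) - res) 2 = 0 ∧ i + 1 < nums.length ∧
          PySem.List.pyGet? nums (i : Int) = PySem.List.pyGet? nums ((i : Int) + 1)
       then res + 1 else res) (i + 1)
  else res
termination_by nums.length - i

def minDeletion_alt (nums : List Int) : Int :=
  let res := loopB nums 0 0
  if PySem.Int.mod ((nums.length : Int) - res) 2 = 1 then res + 1 else res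

-- ===== PRECONDITION & SPEC =====
def Spec_minDeletion (nums : List Int) (out : Int) : Prop := out = minDeletion_alt nums
instance (nums : List Int) (out : Int) : Decidable (Spec_minDeletion nums out) := by unfold Spec_minDeletion; infer_instance

-- ===== CLAIM (what is proved, stated in full; the proofs are below) =====
def Claim_equal_minDeletion : Prop := ∀ (nums : List Int), Dom_minDeletion nums → Spec_minDeletion nums (minDeletion nums)

-- ===== LEMMAS AND PROOFS =====

-- common specification: deletions counted over the remaining suffix
def fspec : List Int → Int
  | [] => 0
  | [_] => 0
  | x :: y :: rest => if x = y then 1 + fspec (y :: rest) else fspec rest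

theorem loopA_eq_fspec (nums : List Int) (cnt i j : Int) (h : i < j) (h0 : 0 ≤ i)
    (hjle : j ≤ (nums.length : Int))
    (heq : PySem.List.pyGet? nums i = PySem.List.pyGet? nums (j - 1)) :
    loopA nums cnt i j h = cnt + fspec (nums.drop (j - 1).toNat) := by
  have hi : i < (nums.length : Int) := by omega
  have hj1 : (j - 1).toNat < nums.length := by omega
  have hdrop1 : nums.drop (j - 1).toNat = nums[(j - 1).toNat] :: nums.drop ((j - 1).toNat + 1) :=
    List.drop_eq_getElem_cons hj1
  rw [loopA, dif_pos hi]
  by_cases hj : j < (nums.length : Int) ∧ PySem.List.pyGet? nums i = PySem.List.pyGet? nums j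
  · rw [dif_pos hj]
    have hjn : j.toNat < nums.length := by omega
    have e1 : PySem.List.pyGet? nums (j - 1) = some nums[(j - 1).toNat] :=
      PySem.List.pyGet?_eq_some_getElem nums (by omega) (by omega)
    have e2 : PySem.List.pyGet? nums j = some nums[j.toNat] :=
      PySem.List.pyGet?_eq_some_getElem nums (by omega) (by omega)
    have hab : nums[(j - 1).toNat] = nums[j.toNat] := by
      have := (heq.symm.trans hj.2)
      rw [e1, e2] at this; exact Option.some.inj this
    have hdrop2 : nums.drop j.toNat = nums[j.toNat] :: nums.drop (j.toNat + 1) :=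
      List.drop_eq_getElem_cons hjn
    have heq' : PySem.List.pyGet? nums i = PySem.List.pyGet? nums (j + 1 - 1) := by
      rw [show (j + 1 - 1 : Int) = j by ring]; exact hj.2
    have hrec := loopA_eq_fspec nums (cnt + 1) i (j + 1) (by omega) h0 (by omega) heq'
    rw [hrec, show ((j + 1 - 1 : Int)).toNat = j.toNat by omega,
      hdrop1, show (j - 1).toNat + 1 = j.toNat by omega, hdrop2]
    simp only [fspec, if_pos hab]
    ring
  · rw [dif_neg hj]
    by_cases hend : j = (nums.length : Int)
    · rw [if_pos hend]
      rw [hdrop1, show (j - 1).toNat + 1 = nums.length by omega, List.drop_length]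
      simp [fspec]
    · rw [if_neg hend]
      have hjlt : j < (nums.length : Int) := by omega
      have e1 : PySem.List.pyGet? nums (j - 1) = some nums[(j - 1).toNat] :=
        PySem.List.pyGet?_eq_some_getElem nums (by omega) (by omega)
      have e2 : PySem.List.pyGet? nums j = some nums[j.toNat] :=
        PySem.List.pyGet?_eq_some_getElem nums (by omega) (by omega)
      have hane : nums[(j - 1).toNat] ≠ nums[j.toNat] := by
        intro hc
        exact hj ⟨hjlt, heq.trans (by rw [e1, e2, hc])⟩
      have hdrop2 : nums.drop j.toNat = nums[j.toNat] :: nums.drop (j.toNat + 1) :=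
        List.drop_eq_getElem_cons (by omega)
      have hrhs : fspec (nums.drop (j - 1).toNat) = fspec (nums.drop (j + 1).toNat) := by
        rw [hdrop1, show (j - 1).toNat + 1 = j.toNat by omega, hdrop2,
          show j.toNat + 1 = (j + 1).toNat by omega]
        simp only [fspec, if_neg hane]
      rw [hrhs]
      by_cases hfit : j + 1 < (nums.length : Int)
      · have hrec := loopA_eq_fspec nums cnt (j + 1) (j + 2) (by omega) (by omega) (by omega)
          (by rw [show (j + 2 - 1 : Int) = j + 1 by ring])
        rw [show ((j + 2 - 1 : Int)).toNat = ((j + 1 : Int)).toNat by omega] at hrec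
        exact hrec
      · rw [loopA, dif_neg (by omega : ¬ (j + 1 < (nums.length : Int))),
          show ((j + 1 : Int)).toNat = nums.length by omega, List.drop_length]
        simp [fspec]
termination_by (nums.length - j).toNat
decreasing_by all_goals omega

theorem loopB_eq_fspec (nums : List Int) (res : Int) (i : Nat) (hle : i ≤ nums.length) :
    loopB nums res i =
      res + (if PySem.Int.mod ((i : Int) - res) 2 = 0 then fspec (nums.drop i)
             else fspec (nums.drop (i + 1))) := by
  have hm : ∀ x : Int, PySem.Int.mod x 2 = x % 2 :=
    fun x => PySem.Int.mod_eq_emod_of_pos (by norm_num)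
  rw [loopB]
  by_cases hi : i < nums.length
  · rw [if_pos hi]
    have hdrop1 : nums.drop i = nums[i] :: nums.drop (i + 1) := List.drop_eq_getElem_cons hi
    by_cases hC : PySem.Int.mod ((i : Int) - res) 2 = 0 ∧ i + 1 < nums.length ∧
        PySem.List.pyGet? nums (i : Int) = PySem.List.pyGet? nums ((i : Int) + 1)
    · rw [if_pos hC]
      obtain ⟨hP, hi1, hE⟩ := hC
      rw [loopB_eq_fspec nums (res + 1) (i + 1) (by omega)]
      have hpar : PySem.Int.mod (((i + 1 : Nat) : Int) - (res + 1)) 2 = 0 := by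
        rw [hm] at hP ⊢; push_cast; omega
      have e1 : PySem.List.pyGet? nums ((i : Nat) : Int) = some nums[(((i : Nat) : Int)).toNat] :=
        PySem.List.pyGet?_eq_some_getElem nums (by omega) (by omega)
      have e2 : PySem.List.pyGet? nums (((i : Nat) : Int) + 1) =
          some nums[((((i : Nat) : Int)) + 1).toNat] :=
        PySem.List.pyGet?_eq_some_getElem nums (by omega) (by omega)
      have hab : nums[i] = nums[i + 1] := by
        rw [e1, e2] at hE
        have := Option.some.inj hE
        simpa using this
      have hdrop2 : nums.drop (i + 1) = nums[i + 1] :: nums.drop (i + 2) :=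
        List.drop_eq_getElem_cons hi1
      rw [if_pos hP, if_pos hpar, hdrop1, hdrop2]
      simp only [fspec, if_pos hab]
      ring
    · rw [if_neg hC]
      rw [loopB_eq_fspec nums res (i + 1) (by omega)]
      by_cases hP : PySem.Int.mod ((i : Int) - res) 2 = 0
      · have hpar : ¬ PySem.Int.mod (((i + 1 : Nat) : Int) - res) 2 = 0 := by
          rw [hm] at hP ⊢; push_cast; omega
        rw [if_pos hP, if_neg hpar]
        by_cases hi1 : i + 1 < nums.length
        · have hane : nums[i] ≠ nums[i + 1] := by
            intro hc
            refine hC ⟨hP, hi1, ?_⟩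
            have e1 : PySem.List.pyGet? nums ((i : Nat) : Int) =
                some nums[(((i : Nat) : Int)).toNat] :=
              PySem.List.pyGet?_eq_some_getElem nums (by omega) (by omega)
            have e2 : PySem.List.pyGet? nums (((i : Nat) : Int) + 1) =
                some nums[((((i : Nat) : Int)) + 1).toNat] :=
              PySem.List.pyGet?_eq_some_getElem nums (by omega) (by omega)
            rw [e1, e2]
            simp [hc]
          have hdrop2 : nums.drop (i + 1) = nums[i + 1] :: nums.drop (i + 2) :=
            List.drop_eq_getElem_cons hi1
          rw [hdrop1, hdrop2]
          simp only [fspec, if_neg hane]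
        · have h2 : nums.drop (i + 1 + 1) = [] := List.drop_eq_nil_of_le (by omega)
          rw [hdrop1, show nums.drop (i + 1) = [] by
            rw [show i + 1 = nums.length by omega, List.drop_length], h2]
          simp [fspec]
      · have hpar : PySem.Int.mod (((i + 1 : Nat) : Int) - res) 2 = 0 := by
          rw [hm] at hP ⊢; push_cast; omega
        rw [if_neg hP, if_pos hpar]
  · rw [if_neg hi]
    have h1 : nums.drop i = [] := List.drop_eq_nil_of_le (by omega)
    have h2 : nums.drop (i + 1) = [] := List.drop_eq_nil_of_le (by omega)
    rw [h1, h2]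
    simp [fspec]
termination_by nums.length - i
decreasing_by all_goals omega

theorem loopA_whole (nums : List Int) : loopA nums 0 0 1 (by omega) = fspec nums := by
  match nums with
  | [] => rw [loopA]; simp [fspec]
  | x :: xs =>
    have := loopA_eq_fspec (x :: xs) 0 0 1 (by omega) (by omega)
      (by simp) rfl
    simpa using this

theorem loopB_whole (nums : List Int) : loopB nums 0 0 = fspec nums := by
  have := loopB_eq_fspec nums 0 0 (by omega)
  simpa [PySem.Int.mod] using this

-- ===== VERDICT (by name: the statement is the Claim_ definition above) =====
theorem minDeletion_spec : Claim_equal_minDeletion := by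
  intro nums _
  unfold Spec_minDeletion minDeletion minDeletion_alt
  rw [loopA_whole, loopB_whole]
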